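-- pv_equiv track=rewrite | github.com/liu770807152/Python-Training | Final2/Lab10/exercises/Q2.py | is_invertible2
-- ===== SOURCE A (Python) =====
-- def is_invertible2(adict):
--     d = {}
--     for value in adict.values():
--         if value in d:
--             return False
--         else:
--             d[value] = 1
--     return True
-- ===== SOURCE B (Python) =====
-- def is_invertible2(adict):
--     vals = sorted(adict.values())
--     return all(x != y for x, y in zip(vals, vals[1:]))
-- ===== Notes on version B (the rewrite author's own statement) =====
-- stated objective: alternative
-- what changed: Replaces hash-based duplicate detection (insert each value into a seen-dict, early exit on collision) with comparison-based sort-then-scan: sort the values and check that no two adjacent sorted values are equal.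
import Mathlib
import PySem

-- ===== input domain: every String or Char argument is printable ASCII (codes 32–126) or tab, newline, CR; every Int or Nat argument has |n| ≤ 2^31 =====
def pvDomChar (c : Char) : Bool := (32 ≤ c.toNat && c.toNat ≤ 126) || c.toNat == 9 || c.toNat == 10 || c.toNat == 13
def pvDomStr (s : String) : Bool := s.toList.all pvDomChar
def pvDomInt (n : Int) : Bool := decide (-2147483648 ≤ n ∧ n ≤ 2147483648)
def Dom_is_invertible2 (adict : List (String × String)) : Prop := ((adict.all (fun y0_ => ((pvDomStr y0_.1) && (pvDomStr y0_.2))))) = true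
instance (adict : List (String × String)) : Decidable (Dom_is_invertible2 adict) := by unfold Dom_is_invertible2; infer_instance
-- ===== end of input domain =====

-- B replaces A's hash-based early-exit duplicate check by sort-then-adjacent-scan (alternative algorithm, not claimed faster).

-- ===== PORT A =====
-- the 'for value in adict.values(): if value in d: return False else d[value] = 1' loop
def isInvLoop : List String → PySem.Dict String Int → Bool
  | [], _ => true
  | v :: rest, d => if d.contains v then false else isInvLoop rest (d.insert v 1)

def is_invertible2 (adict : List (String × String)) : Bool :=
  isInvLoop (adict.map (·.2)) PySem.Dict.empty

-- ===== PORT B =====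
-- vals = sorted(adict.values()); return all(x != y for x, y in zip(vals, vals[1:]))
-- (vals[1:] on a list is its tail, ported as drop 1)
def is_invertible2_alt (adict : List (String × String)) : Bool :=
  let vals := PySem.List.sorted (adict.map (·.2)) (fun x => x) false
  (vals.zip (vals.drop 1)).all (fun p => p.1 != p.2)

-- ===== PRECONDITION & SPEC =====
def Spec_is_invertible2 (adict : List (String × String)) (out : Bool) : Prop := out = is_invertible2_alt adict
instance (adict : List (String × String)) (out : Bool) : Decidable (Spec_is_invertible2 adict out) := by unfold Spec_is_invertible2; infer_instance

-- ===== CLAIM (what is proved, stated in full; the proofs are below) =====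
def Claim_equal_is_invertible2 : Prop := ∀ (adict : List (String × String)), Dom_is_invertible2 adict → Spec_is_invertible2 adict (is_invertible2 adict)

-- ===== LEMMAS AND PROOFS =====

theorem isInvLoop_eq (vs : List String) (d : PySem.Dict String Int) :
    isInvLoop vs d = decide (vs.Nodup ∧ ∀ v ∈ vs, d.contains v = false) := by
  induction vs generalizing d with
  | nil => simp [isInvLoop]
  | cons v rest ih =>
    simp only [isInvLoop]
    by_cases h : d.contains v = true
    · rw [if_pos h]
      symm; simp only [decide_eq_false_iff_not]
      rintro ⟨-, hall⟩
      exact absurd (hall v (by simp)) (by simp [h])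
    · rw [if_neg (by simp [h]), ih]
      simp only [Bool.not_eq_true] at h
      simp only [List.nodup_cons, List.mem_cons, decide_eq_decide]
      constructor
      · rintro ⟨hn, hall⟩
        refine ⟨⟨fun hv => ?_, hn⟩, ?_⟩
        · have := hall v hv
          simp at this
        · rintro w (rfl | hw)
          · exact h
          · have := hall w hw
            rw [PySem.Dict.contains_insert] at this
            exact (by simpa using this : ¬w = v ∧ d.contains w = false).2
      · rintro ⟨⟨hv, hn⟩, hall⟩
        refine ⟨hn, fun w hw => ?_⟩
        rw [PySem.Dict.contains_insert]
        have : w ≠ v := fun e => hv (e ▸ hw)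
        simp [this, hall w (Or.inr hw)]

-- on a ≤-sorted list, adjacent distinctness is exactly Nodup
theorem adj_ne_eq_nodup (s : List String) (hp : s.Pairwise (· ≤ ·)) :
    (s.zip (s.drop 1)).all (fun p => p.1 != p.2) = decide s.Nodup := by
  induction s with
  | nil => simp
  | cons a t ih =>
    cases t with
    | nil => simp
    | cons b u =>
      have hp' : (b :: u).Pairwise (· ≤ ·) := (List.pairwise_cons.1 hp).2
      have hab : a ≤ b := (List.pairwise_cons.1 hp).1 b (by simp)
      simp only [List.drop_one, List.tail_cons, List.zip_cons_cons, List.all_cons]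
      rw [show ((b :: u).zip u) = ((b :: u).zip ((b::u).drop 1)) by simp, ih hp']
      by_cases hne : a = b
      · subst hne
        simp [List.nodup_cons]
      · have halt : a < b := lt_of_le_of_ne hab hne
        have hnotmem : a ∉ b :: u := by
          intro hmem
          rcases List.mem_cons.1 hmem with rfl | hu
          · exact hne rfl
          · have hbu : b ≤ a := (List.pairwise_cons.1 hp').1 a hu
            exact absurd (lt_of_lt_of_le halt hbu) (lt_irrefl a)
        simp [bne, hne, List.nodup_cons, hnotmem]

-- ===== VERDICT (by name: the statement is the Claim_ definition above) =====
theorem is_invertible2_spec : Claim_equal_is_invertible2 := by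
  intro adict _
  unfold Spec_is_invertible2 is_invertible2 is_invertible2_alt
  rw [isInvLoop_eq]
  dsimp only
  rw [adj_ne_eq_nodup _ (by simpa using PySem.List.sorted_pairwise (adict.map (·.2)) (fun x => x))]
  have hperm := PySem.List.sorted_perm (adict.map (·.2)) (fun x => x) false
  simp [PySem.Dict.contains_empty, hperm.nodup_iff]
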